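-- pv_equiv track=rewrite | github.com/ajitpattar708/Spring2Don-RAG | src/rag/embeddings.py | chunk_code
-- ===== SOURCE A (Python) =====
-- from typing import List, Optional
--
-- def chunk_code(code: str, chunk_type: str = 'function') -> List[str]:
--     """
--     Chunk code into smaller pieces for embedding
--
--     Args:
--         code: Source code string
--         chunk_type: Type of chunking ('function', 'class', 'file')
--
--     Returns:
--         List of code chunks
--     """
--     # TODO: Implement intelligent code chunking
--     # For now, simple line-based chunking
--
--     lines = code.split('\n')
--     chunks = []
--
--     if chunk_type == 'function':
--         # Try to chunk by functions
--         current_chunk = []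
--         for line in lines:
--             current_chunk.append(line)
--             # Simple heuristic: function ends with closing brace
--             if line.strip().startswith('}'):
--                 chunks.append('\n'.join(current_chunk))
--                 current_chunk = []
--         if current_chunk:
--             chunks.append('\n'.join(current_chunk))
--     else:
--         # Default: return entire code as single chunk
--         chunks = [code]
--
--     return chunks
-- ===== SOURCE B (Python) =====
-- def chunk_code(code, chunk_type='function'):
--     if chunk_type != 'function':
--         return [code]
--     lines = code.split('\n')
--     bounds = [i for i, line in enumerate(lines) if line.strip().startswith('}')]
--     chunks = []
--     prev = 0
--     for b in bounds:
--         chunks.append('\n'.join(lines[prev:b + 1]))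
--         prev = b + 1
--     if prev < len(lines):
--         chunks.append('\n'.join(lines[prev:]))
--     return chunks
-- ===== Notes on version B (the rewrite author's own statement) =====
-- stated objective: alternative
-- what changed: Replaces A's accumulate-and-flush loop (growing a current_chunk buffer and flushing it at each closing-brace line) with an index-table-then-slice shape: one pass collects boundary line indices, then chunks are built by slicing between consecutive boundaries, with a trailing slice when lines remain.
import Mathlib
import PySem

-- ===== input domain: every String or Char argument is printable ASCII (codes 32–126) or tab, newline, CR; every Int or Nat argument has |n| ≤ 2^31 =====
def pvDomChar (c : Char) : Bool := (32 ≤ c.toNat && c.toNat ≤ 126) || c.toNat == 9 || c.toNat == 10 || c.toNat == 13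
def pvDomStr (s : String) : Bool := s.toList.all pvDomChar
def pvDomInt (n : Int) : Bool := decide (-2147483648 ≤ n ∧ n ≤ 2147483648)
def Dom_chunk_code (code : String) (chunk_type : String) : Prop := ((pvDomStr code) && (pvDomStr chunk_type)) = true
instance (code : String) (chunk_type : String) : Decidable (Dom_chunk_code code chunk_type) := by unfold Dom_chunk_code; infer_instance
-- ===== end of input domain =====

-- B replaces A's accumulate-and-flush loop with an index-table-then-slice shape (same cost, different decomposition).

-- ===== PORT A =====
-- line.strip().startswith('}') — the boundary heuristic both sources use
def pvPred (line : String) : Bool := PySem.Str.startswith (PySem.Str.strip line) "}"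

-- code.split('\n'): sep is the nonempty literal '\n', so split? is always some; getD is a totality guard only
def pvLines (code : String) : List String := (PySem.Str.split? code "\n").getD []

-- the body of A's for-loop: append the line to current_chunk, flush on a boundary line
def pvStepA (st : List String × List String) (line : String) : List String × List String :=
  let cur := st.2 ++ [line]
  if pvPred line then (st.1 ++ [PySem.Str.join "\n" cur], []) else (st.1, cur)

def chunk_code (code : String) (chunk_type : String) : List String :=
  if chunk_type = "function" then
    if ((pvLines code).foldl pvStepA ([], [])).2.isEmpty then
      ((pvLines code).foldl pvStepA ([], [])).1
    else
      ((pvLines code).foldl pvStepA ([], [])).1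
        ++ [PySem.Str.join "\n" ((pvLines code).foldl pvStepA ([], [])).2]
  else [code]

-- ===== PORT B =====
-- the body of B's for-loop over the boundary table: emit lines[prev:b+1], advance prev
def pvStepB (lines : List String) (st : List String × Int) (b : Int) : List String × Int :=
  (st.1 ++ [PySem.Str.join "\n" (PySem.List.slice lines (some st.2) (some (b + 1)))], b + 1)

-- [i for i, line in enumerate(lines) if line.strip().startswith('}')]
def pvBoundTable (lines : List String) : List Int :=
  ((PySem.List.enumerate lines).filter (fun p => pvPred p.2)).map (·.1)

def chunk_code_alt (code : String) (chunk_type : String) : List String :=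
  if chunk_type ≠ "function" then [code]
  else
    if ((pvBoundTable (pvLines code)).foldl (pvStepB (pvLines code)) ([], 0)).2
        < ((pvLines code).length : Int) then
      ((pvBoundTable (pvLines code)).foldl (pvStepB (pvLines code)) ([], 0)).1
        ++ [PySem.Str.join "\n" (PySem.List.slice (pvLines code)
             (some ((pvBoundTable (pvLines code)).foldl (pvStepB (pvLines code)) ([], 0)).2) none)]
    else ((pvBoundTable (pvLines code)).foldl (pvStepB (pvLines code)) ([], 0)).1

-- ===== PRECONDITION & SPEC =====
def Spec_chunk_code (code : String) (chunk_type : String) (out : List String) : Prop := out = chunk_code_alt code chunk_type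
instance (code : String) (chunk_type : String) (out : List String) : Decidable (Spec_chunk_code code chunk_type out) := by unfold Spec_chunk_code; infer_instance

-- ===== CLAIM (what is proved, stated in full; the proofs are below) =====
def Claim_equal_chunk_code : Prop := ∀ (code : String) (chunk_type : String), Dom_chunk_code code chunk_type → Spec_chunk_code code chunk_type (chunk_code code chunk_type)

-- ===== LEMMAS AND PROOFS =====

-- the common specification: the list of line-groups both programs join with '\n'
def pvGroups : List String → List (List String)
  | [] => []
  | x :: xs =>
    if pvPred x then [x] :: pvGroups xs
    else
      match pvGroups xs with
      | [] => [[x]]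
      | g :: gs => (x :: g) :: gs

lemma pvGroups_pos (x : String) (xs : List String) (h : pvPred x = true) :
    pvGroups (x :: xs) = [x] :: pvGroups xs := by simp [pvGroups, h]

lemma pvGroups_neg (x : String) (xs : List String) (h : ¬ pvPred x = true) :
    pvGroups (x :: xs) = match pvGroups xs with
      | [] => [[x]]
      | g :: gs => (x :: g) :: gs := by simp [pvGroups, h]

-- A-side view: attach the pending buffer to the groups of the remaining lines
def pvAttach (cur : List String) : List (List String) → List (List String)
  | [] => if cur.isEmpty then [] else [cur]
  | g :: gs => (cur ++ g) :: gs

lemma pvAttach_nil (s : List (List String)) : pvAttach [] s = s := by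
  cases s <;> simp [pvAttach]

lemma pvStepA_pos (st : List String × List String) (x : String) (h : pvPred x = true) :
    pvStepA st x = (st.1 ++ [PySem.Str.join "\n" (st.2 ++ [x])], []) := by
  simp [pvStepA, h]

lemma pvStepA_neg (st : List String × List String) (x : String) (h : ¬ pvPred x = true) :
    pvStepA st x = (st.1, st.2 ++ [x]) := by
  simp [pvStepA, h]

lemma lemA (l : List String) : ∀ (cs cur : List String),
    (if (l.foldl pvStepA (cs, cur)).2.isEmpty then (l.foldl pvStepA (cs, cur)).1
     else (l.foldl pvStepA (cs, cur)).1 ++ [PySem.Str.join "\n" (l.foldl pvStepA (cs, cur)).2])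
    = cs ++ (pvAttach cur (pvGroups l)).map (PySem.Str.join "\n") := by
  induction l with
  | nil =>
    intro cs cur
    cases cur <;> simp [pvAttach, pvGroups]
  | cons x xs ih =>
    intro cs cur
    by_cases h : pvPred x
    · rw [List.foldl_cons, pvStepA_pos _ _ h, ih, pvAttach_nil, pvGroups_pos _ _ h]
      simp [pvAttach]
    · rw [List.foldl_cons, pvStepA_neg _ _ h, ih, pvGroups_neg _ _ h]
      cases hg : pvGroups xs with
      | nil => simp [pvAttach]
      | cons g gs => simp [pvAttach]

-- B-side view: the Nat-valued boundary indices of the lines, starting at offset s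
def pvBounds (s : Nat) : List String → List Nat
  | [] => []
  | x :: xs => (if pvPred x then [s] else []) ++ pvBounds (s + 1) xs

lemma pvBounds_succ (l : List String) : ∀ s : Nat, pvBounds (s + 1) l = (pvBounds s l).map (· + 1) := by
  induction l with
  | nil => intro s; simp [pvBounds]
  | cons x xs ih =>
    intro s
    by_cases h : pvPred x <;> simp [pvBounds, h, ih (s + 1)]

lemma pvBounds_enum (l : List String) : ∀ s : Nat,
    ((PySem.List.enumerate l (s : Int)).filter (fun p => pvPred p.2)).map (·.1)
      = (pvBounds s l).map (Nat.cast : Nat → Int) := by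
  induction l with
  | nil => intro s; simp [PySem.List.enumerate_nil, pvBounds]
  | cons x xs ih =>
    intro s
    rw [PySem.List.enumerate_cons]
    have hc : ((s : Int) + 1) = ((s + 1 : Nat) : Int) := by push_cast; ring
    by_cases h : pvPred x
    · rw [List.filter_cons_of_pos (by simpa using h)]
      rw [List.map_cons, hc, ih (s + 1)]
      simp [pvBounds, h]
    · rw [List.filter_cons_of_neg (by simpa using h)]
      rw [hc, ih (s + 1)]
      simp [pvBounds, h]

-- the chunk slices determined by a boundary table
def pvChunksOf (lines : List String) : List Nat → Nat → List (List String)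
  | [], prev => if prev < lines.length then [lines.drop prev] else []
  | n :: rest, prev => ((lines.drop prev).take (n + 1 - prev)) :: pvChunksOf lines rest (n + 1)

lemma pvChunksOf_shift (x : String) (xs : List String) (ns : List Nat) :
    ∀ p : Nat, pvChunksOf (x :: xs) (ns.map (· + 1)) (p + 1) = pvChunksOf xs ns p := by
  induction ns with
  | nil => intro p; simp [pvChunksOf]
  | cons n rest ih =>
    intro p
    simp only [List.map_cons, pvChunksOf, List.drop_succ_cons]
    rw [ih (n + 1)]
    congr 2
    omega

lemma pvChunksOf_groups (l : List String) : pvChunksOf l (pvBounds 0 l) 0 = pvGroups l := by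
  induction l with
  | nil => simp [pvBounds, pvChunksOf, pvGroups]
  | cons x xs ih =>
    by_cases h : pvPred x
    · have hbnd : pvBounds 0 (x :: xs) = 0 :: (pvBounds 0 xs).map (· + 1) := by
        rw [show (1 : Nat) = 0 + 1 from rfl] at *
        simp [pvBounds, h, pvBounds_succ]
      rw [hbnd, pvGroups_pos _ _ h]
      show ((x :: xs).drop 0).take (0 + 1 - 0) :: pvChunksOf (x :: xs) ((pvBounds 0 xs).map (· + 1)) (0 + 1) = _
      rw [pvChunksOf_shift x xs _ 0, ih]
      simp
    · have hbnd : pvBounds 0 (x :: xs) = (pvBounds 0 xs).map (· + 1) := by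
        rw [show (1 : Nat) = 0 + 1 from rfl] at *
        simp [pvBounds, h, pvBounds_succ]
      rw [hbnd, pvGroups_neg _ _ h]
      cases hb : pvBounds 0 xs with
      | nil =>
        rw [hb] at ih
        simp only [List.map_nil, pvChunksOf, List.length_cons]
        cases xs with
        | nil => simp [pvChunksOf, pvGroups] at ih ⊢
        | cons y ys =>
          simp only [pvChunksOf, List.length_cons] at ih
          rw [if_pos (by omega)] at ih
          rw [if_pos (by omega), ← ih]
          simp
      | cons n rest =>
        rw [hb] at ih
        simp only [List.map_cons, pvChunksOf, List.drop_zero, Nat.sub_zero,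
          List.take_succ_cons] at ih ⊢
        rw [pvChunksOf_shift x xs rest (n + 1), ← ih]

lemma lemB (lines : List String) (ns : List Nat) : ∀ (cs : List String) (p : Nat),
    (if ((ns.map (Nat.cast : Nat → Int)).foldl (pvStepB lines) (cs, (p : Int))).2 < (lines.length : Int) then
       ((ns.map (Nat.cast : Nat → Int)).foldl (pvStepB lines) (cs, (p : Int))).1
         ++ [PySem.Str.join "\n" (PySem.List.slice lines
              (some ((ns.map (Nat.cast : Nat → Int)).foldl (pvStepB lines) (cs, (p : Int))).2) none)]
     else ((ns.map (Nat.cast : Nat → Int)).foldl (pvStepB lines) (cs, (p : Int))).1)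
    = cs ++ (pvChunksOf lines ns p).map (PySem.Str.join "\n") := by
  induction ns with
  | nil =>
    intro cs p
    simp only [List.map_nil, List.foldl_nil, pvChunksOf]
    rw [PySem.List.slice_from_natCast]
    by_cases h : p < lines.length
    · rw [if_pos (by exact_mod_cast h), if_pos h]; simp
    · rw [if_neg (by exact_mod_cast h), if_neg h]; simp
  | cons n rest ih =>
    intro cs p
    have hs : pvStepB lines (cs, (p : Int)) (n : Int)
        = (cs ++ [PySem.Str.join "\n" ((lines.drop p).take (n + 1 - p))], ((n + 1 : Nat) : Int)) := by
      simp only [pvStepB]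
      have hc : ((n : Int) + 1) = ((n + 1 : Nat) : Int) := by push_cast; ring
      rw [hc, PySem.List.slice_natCast]
    rw [List.map_cons, List.foldl_cons, hs,
      ih (cs ++ [PySem.Str.join "\n" ((lines.drop p).take (n + 1 - p))]) (n + 1)]
    simp [pvChunksOf]

-- ===== VERDICT (by name: the statement is the Claim_ definition above) =====
theorem chunk_code_spec : Claim_equal_chunk_code := by
  intro code chunk_type _
  unfold Spec_chunk_code chunk_code chunk_code_alt
  by_cases h : chunk_type = "function"
  · rw [if_pos h, if_neg (show ¬ chunk_type ≠ "function" by simp [h])]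
    rw [lemA (pvLines code) [] [], pvAttach_nil, List.nil_append]
    have hb := pvBounds_enum (pvLines code) 0
    rw [Nat.cast_zero] at hb
    have hB := lemB (pvLines code) (pvBounds 0 (pvLines code)) [] 0
    rw [Nat.cast_zero] at hB
    rw [pvBoundTable, hb, hB, pvChunksOf_groups]
    simp
  · rw [if_neg h, if_pos (show chunk_type ≠ "function" from h)]
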